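-- pv_equiv track=rewrite | github.com/Dreded/phoneNumberGame | phone.py | getPhoneNumber
-- ===== SOURCE A (Python) =====
-- def getPhoneNumber(rand, number):
--
--     phoneNumber = ''
--     i = 0
--     for num in number:
--         if i in rand:
--             phoneNumber += '_'
--         else:
--             phoneNumber += str(num)
--         i+=1
--         if i == 3 or i == 6:
--             phoneNumber += '-'
--
--     return phoneNumber
-- ===== SOURCE B (Python) =====
-- def getPhoneNumber(rand, number):
--     toks = ['_' if i in rand else str(n) for i, n in enumerate(number)]
--     out = ''.join(toks[:3])
--     if len(toks) >= 3:
--         out += '-'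
--     out += ''.join(toks[3:6])
--     if len(toks) >= 6:
--         out += '-'
--     out += ''.join(toks[6:])
--     return out
-- ===== Notes on version B (the rewrite author's own statement) =====
-- stated objective: alternative
-- what changed: Replaced A's single interleaved loop (appending a digit/underscore and a dash when the running index hits 3 or 6) by a build pass that produces the masked token list via enumerate, followed by slice-based assembly (toks[:3], toks[3:6], toks[6:]) with length-guarded dash insertion.
import Mathlib
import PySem

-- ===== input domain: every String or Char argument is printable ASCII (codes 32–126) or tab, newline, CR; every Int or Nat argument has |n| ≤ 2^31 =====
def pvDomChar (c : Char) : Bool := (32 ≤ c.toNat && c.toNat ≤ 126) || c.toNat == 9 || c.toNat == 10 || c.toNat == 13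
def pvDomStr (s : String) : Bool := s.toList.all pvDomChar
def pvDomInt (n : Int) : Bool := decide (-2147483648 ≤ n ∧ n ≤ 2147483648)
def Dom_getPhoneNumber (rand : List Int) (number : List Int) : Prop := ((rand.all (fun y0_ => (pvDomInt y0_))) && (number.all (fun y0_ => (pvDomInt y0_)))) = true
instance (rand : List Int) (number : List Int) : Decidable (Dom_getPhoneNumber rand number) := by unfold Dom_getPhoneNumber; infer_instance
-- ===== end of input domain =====

-- B replaces A's single interleaved loop by a token-build pass plus slice-based assembly with
-- length-guarded dashes (objective: alternative decomposition, same cost).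
-- ===== PORT A =====
-- A: one interleaved loop, appending the token and then a dash when the running index hits 3 or 6.
def getPhoneNumber (rand : List Int) (number : List Int) : String :=
  let r := number.foldl
    (fun (st : List Char × Int) num =>
      let s := if rand.contains st.2 then st.1 ++ ['_'] else st.1 ++ PySem.Int.toChars num
      let i := st.2 + 1
      (if i = 3 ∨ i = 6 then s ++ ['-'] else s, i))
    ([], 0)
  String.ofList r.1

-- ===== PORT B =====
-- B: build the masked tokens in one pass, then assemble by slices with length-guarded dashes.
def getPhoneNumber_alt (rand : List Int) (number : List Int) : String :=
  let toks : List (List Char) :=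
    (PySem.List.enumerate number).map
      (fun p => if rand.contains p.1 then ['_'] else PySem.Int.toChars p.2)
  let out := (toks.take 3).flatten
  let out := if 3 ≤ toks.length then out ++ ['-'] else out
  let out := out ++ ((toks.drop 3).take 3).flatten
  let out := if 6 ≤ toks.length then out ++ ['-'] else out
  String.ofList (out ++ (toks.drop 6).flatten)

-- ===== PRECONDITION & SPEC =====
def Spec_getPhoneNumber (rand : List Int) (number : List Int) (out : String) : Prop := out = getPhoneNumber_alt rand number
instance (rand : List Int) (number : List Int) (out : String) : Decidable (Spec_getPhoneNumber rand number out) := by unfold Spec_getPhoneNumber; infer_instance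

-- ===== CLAIM (what is proved, stated in full; the proofs are below) =====
def Claim_equal_getPhoneNumber : Prop := ∀ (rand : List Int) (number : List Int), Dom_getPhoneNumber rand number → Spec_getPhoneNumber rand number (getPhoneNumber rand number)

-- ===== LEMMAS AND PROOFS =====

-- the token written for position i, value n (shared shape of both ports)
def pvTok (rand : List Int) (i : Int) (n : Int) : List Char :=
  if rand.contains i then ['_'] else PySem.Int.toChars n

-- the suffix A's loop appends when started at index i
def pvRest (rand : List Int) : List Int → Int → List Char
  | [], _ => []
  | n :: ns, i => pvTok rand i n ++ (if i + 1 = 3 ∨ i + 1 = 6 then ['-'] else []) ++ pvRest rand ns (i + 1)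

theorem pvFoldA (rand : List Int) (l : List Int) (acc : List Char) (i : Int) :
    (l.foldl
      (fun (st : List Char × Int) num =>
        let s := if rand.contains st.2 then st.1 ++ ['_'] else st.1 ++ PySem.Int.toChars num
        let j := st.2 + 1
        (if j = 3 ∨ j = 6 then s ++ ['-'] else s, j))
      (acc, i)).1 = acc ++ pvRest rand l i := by
  induction l generalizing acc i with
  | nil => simp [pvRest]
  | cons n ns ih =>
    simp only [List.foldl_cons]
    rw [ih]
    simp only [pvRest, pvTok]
    split_ifs <;> simp [List.append_assoc]

theorem pvRest_nodash (rand : List Int) (l : List Int) (i : Int) (h : 6 ≤ i) :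
    pvRest rand l i
      = ((PySem.List.enumerate l i).map
          (fun p => if rand.contains p.1 then ['_'] else PySem.Int.toChars p.2)).flatten := by
  induction l generalizing i with
  | nil => simp [pvRest, PySem.List.enumerate_nil]
  | cons n ns ih =>
    have hd : ¬ (i + 1 = 3 ∨ i + 1 = 6) := by omega
    simp [pvRest, PySem.List.enumerate_cons, hd, pvTok, ih (i + 1) (by omega)]

theorem getPhoneNumber_eq_alt (rand : List Int) (number : List Int) :
    getPhoneNumber rand number = getPhoneNumber_alt rand number := by
  unfold getPhoneNumber getPhoneNumber_alt
  simp only [pvFoldA, List.nil_append]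
  congr 1
  match number with
  | [] => simp [pvRest, PySem.List.enumerate_nil]
  | [a] => simp [pvRest, pvTok, PySem.List.enumerate_cons, PySem.List.enumerate_nil]
  | [a, b] => simp [pvRest, pvTok, PySem.List.enumerate_cons, PySem.List.enumerate_nil]
  | [a, b, c] =>
    norm_num [pvRest, pvTok, PySem.List.enumerate_cons, PySem.List.enumerate_nil]
  | [a, b, c, d] =>
    norm_num [pvRest, pvTok, PySem.List.enumerate_cons, PySem.List.enumerate_nil]
  | [a, b, c, d, e] =>
    norm_num [pvRest, pvTok, PySem.List.enumerate_cons, PySem.List.enumerate_nil]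
  | a :: b :: c :: d :: e :: f :: rest =>
    norm_num [pvRest, pvTok, PySem.List.enumerate_cons,
      pvRest_nodash rand rest 6 (le_refl 6)]

-- ===== VERDICT (by name: the statement is the Claim_ definition above) =====
theorem getPhoneNumber_spec : Claim_equal_getPhoneNumber := by
  intro rand number _
  unfold Spec_getPhoneNumber
  exact getPhoneNumber_eq_alt rand number
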